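-- pv_equiv track=rewrite | github.com/eliseduverdier/advent-of-code | 2020/24/main.py | parseDirections
-- ===== SOURCE A (Python) =====
-- def parseDirections(directionString): # line
--     dir = []
--     i = 0
--     while i < len(directionString):
--         if directionString[i] == 'e' or directionString[i] == 'w':
--             dir += [ directionString[:i+1] ]
--             directionString = directionString[i+1:]
--             i = -1
--         i += 1
--     return dir
-- ===== SOURCE B (Python) =====
-- def parseDirections(directionString):
--     dir = []
--     cur = ''
--     for ch in directionString:
--         cur += ch
--         if ch == 'e' or ch == 'w':
--             dir.append(cur)
--             cur = ''
--     return dir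
-- ===== Notes on version B (the rewrite author's own statement) =====
-- stated objective: faster
-- what changed: Replaced the rescanning while-loop that repeatedly slices the string and resets the index with a single linear pass accumulating the current token and flushing it on each 'e'/'w' terminator.
import Mathlib
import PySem

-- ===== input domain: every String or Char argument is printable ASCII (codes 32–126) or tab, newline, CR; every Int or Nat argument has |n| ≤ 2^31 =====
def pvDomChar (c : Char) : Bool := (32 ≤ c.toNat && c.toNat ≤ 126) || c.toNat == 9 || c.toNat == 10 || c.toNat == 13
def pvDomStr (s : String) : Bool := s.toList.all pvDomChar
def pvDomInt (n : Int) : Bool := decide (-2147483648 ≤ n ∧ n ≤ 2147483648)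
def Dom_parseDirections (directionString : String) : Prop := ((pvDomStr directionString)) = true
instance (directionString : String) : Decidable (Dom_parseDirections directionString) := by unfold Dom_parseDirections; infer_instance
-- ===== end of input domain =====

-- B replaces A's rescan-and-slice loop by one linear pass flushing the token at each 'e'/'w'.

-- ===== PORT A =====
-- A's while-loop over a shrinking string, index reset to 0 after each cut (strings as their
-- character lists; [:i+1]/[i+1:] with i+1 ≥ 0 are take/drop — exact here). The loop is not
-- structurally recursive, so it carries a fuel argument; 2*len+1 fuel provably suffices
-- (each iteration strictly decreases 2*s.length - i), so the fuel = 0 branch is never taken.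
def pvLoopA (fuel : Nat) (dir : List String) (s : List Char) (i : Nat) : List String :=
  match fuel with
  | 0 => dir
  | fuel + 1 =>
    if h : i < s.length then
      if s[i] = 'e' ∨ s[i] = 'w' then
        pvLoopA fuel (dir ++ [String.ofList (s.take (i+1))]) (s.drop (i+1)) 0
      else
        pvLoopA fuel dir s (i+1)
    else dir

def parseDirections (directionString : String) : List String :=
  pvLoopA (2 * directionString.toList.length + 1) [] directionString.toList 0

-- ===== PORT B =====
-- B's single pass: cur accumulates characters, flushed into dir on 'e'/'w'.
def pvLoopB (s : List Char) (cur : List Char) (dir : List String) : List String :=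
  match s with
  | [] => dir
  | c :: rest =>
    if c = 'e' ∨ c = 'w' then pvLoopB rest [] (dir ++ [String.ofList (cur ++ [c])])
    else pvLoopB rest (cur ++ [c]) dir

def parseDirections_alt (directionString : String) : List String :=
  pvLoopB directionString.toList [] []

-- ===== PRECONDITION & SPEC =====
def Spec_parseDirections (directionString : String) (out : List String) : Prop := out = parseDirections_alt directionString
instance (directionString : String) (out : List String) : Decidable (Spec_parseDirections directionString out) := by unfold Spec_parseDirections; infer_instance

-- ===== CLAIM (what is proved, stated in full; the proofs are below) =====
def Claim_equal_parseDirections : Prop := ∀ (directionString : String), Dom_parseDirections directionString → Spec_parseDirections directionString (parseDirections directionString)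

-- ===== LEMMAS AND PROOFS =====

-- Invariant: with enough fuel, if the first i characters of s contain no terminator, A's loop
-- from (s, i) equals B's loop on the rest of s with those i characters as the current token.
lemma pvLoopA_eq_loopB (fuel : Nat) : ∀ (s : List Char) (i : Nat) (dir : List String),
    2 * s.length - i < fuel → i ≤ s.length →
    (∀ c ∈ s.take i, ¬(c = 'e' ∨ c = 'w')) →
    pvLoopA fuel dir s i = pvLoopB (s.drop i) (s.take i) dir := by
  induction fuel with
  | zero => intro s i dir hk; omega
  | succ fuel ih =>
    intro s i dir hk hi hno
    rw [pvLoopA]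
    by_cases h : i < s.length
    · have hdrop : s.drop i = s[i] :: s.drop (i+1) := List.drop_eq_getElem_cons h
      have htake : s.take (i+1) = s.take i ++ [s[i]] := by
        rw [List.take_add_one]; simp [List.getElem?_eq_getElem h]
      by_cases hc : s[i] = 'e' ∨ s[i] = 'w'
      · simp only [h, dif_pos, hc, if_pos]
        rw [ih (s.drop (i+1)) 0 _ (by simp; omega) (by omega) (by simp)]
        rw [hdrop] at *
        simp only [pvLoopB, if_pos hc, htake]
        simp
      · simp only [h, dif_pos, hc, if_neg, not_false_iff]
        rw [ih s (i+1) dir (by omega) (by omega)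
            (by intro c hcmem; rw [htake] at hcmem
                rcases List.mem_append.mp hcmem with h1 | h1
                · exact hno c h1
                · simp at h1; subst h1; exact hc)]
        rw [hdrop, htake]
        simp [pvLoopB, hc]
    · simp only [h, dif_neg, not_false_iff]
      have : i = s.length := by omega
      subst this
      simp [pvLoopB]

-- ===== VERDICT (by name: the statement is the Claim_ definition above) =====
theorem parseDirections_spec : Claim_equal_parseDirections := by
  intro s _
  unfold Spec_parseDirections parseDirections parseDirections_alt
  exact pvLoopA_eq_loopB (2 * s.toList.length + 1) s.toList 0 [] (by omega) (by omega) (by simp)
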